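-- pv_equiv track=rewrite | github.com/mic0ud/Leetcode-py3 | src/1109.corporate-flight-bookings.py | corpFlightBookings_TLE
-- ===== SOURCE A (Python) =====
-- from operator import itemgetter
--
-- def corpFlightBookings_TLE(bookings: [[int]], n: int) -> [int]:
--     if not bookings or not bookings[0] or n == 0:
--         return [0]
--     res = [0 for _ in range(n+1)]
--     bookings = sorted(bookings, key=itemgetter(0))
--     for b in bookings:
--         for k in range(b[0],b[1]+1):
--             res[k] += b[2]
--     return res[1:]
-- ===== SOURCE B (Python) =====
-- # Difference array + prefix sum in place of A's per-seat range scan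
-- # (and no sort). A's first-line guard for degenerate inputs is kept as-is.
-- def corpFlightBookings_TLE(bookings, n):
--     if not bookings or not bookings[0] or n == 0:
--         return [0]
--     diff = [0] * (n + 2)
--     for b in bookings:
--         diff[b[0]] += b[2]
--         diff[b[1] + 1] -= b[2]
--     res = []
--     total = 0
--     for i in range(1, n + 1):
--         total += diff[i]
--         res.append(total)
--     return res
-- ===== Notes on version B (the rewrite author's own statement) =====
-- stated objective: alternative
-- what changed: Replaces A's per-seat double loop (incrementing every flight index of every booking range, after an unnecessary sort) by a difference array with a single prefix-sum pass; A's first-line guard for degenerate inputs is kept unchanged.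
-- outside the precondition, e.g. on corpFlightBookings_TLE([[3, 1, 5]], 3): A returns [0, 0, 0], B returns [0, -5, 0]; on corpFlightBookings_TLE([[-2, 1, 5]], 2): A returns [10, 5], B returns [0, 0]
import Mathlib
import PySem

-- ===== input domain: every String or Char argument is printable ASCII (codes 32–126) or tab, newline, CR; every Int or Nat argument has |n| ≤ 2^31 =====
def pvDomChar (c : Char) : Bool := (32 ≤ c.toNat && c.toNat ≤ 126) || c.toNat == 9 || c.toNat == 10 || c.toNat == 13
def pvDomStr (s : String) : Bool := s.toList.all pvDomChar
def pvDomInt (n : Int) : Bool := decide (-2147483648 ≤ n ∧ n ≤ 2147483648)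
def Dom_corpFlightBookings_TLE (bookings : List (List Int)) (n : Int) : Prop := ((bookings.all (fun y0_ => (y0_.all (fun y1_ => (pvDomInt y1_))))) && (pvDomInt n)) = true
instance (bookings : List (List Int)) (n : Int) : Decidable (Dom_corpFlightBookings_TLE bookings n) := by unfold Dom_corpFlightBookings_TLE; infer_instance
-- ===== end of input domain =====

-- B replaces A's per-seat double loop (and sort) by a difference array + one prefix-sum pass; A's first-line degenerate-input guard is kept unchanged.

-- ===== PORT A =====
def corpFlightBookings_TLE (bookings : List (List Int)) (n : Int) : List Int :=
  if bookings = [] ∨ bookings.headD [] = [] ∨ n = 0 then [0]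
  else
    let res : List Int := (PySem.List.pyRange 0 (n+1) 1).map (fun _ => (0:Int))
    let sortedB := PySem.List.sorted bookings (fun b => PySem.List.pyGetD b 0 0) false
    let res := sortedB.foldl (fun r b =>
      (PySem.List.pyRange (PySem.List.pyGetD b 0 0) (PySem.List.pyGetD b 1 0 + 1) 1).foldl
        (fun r k => PySem.List.pySetD r k (PySem.List.pyGetD r k 0 + PySem.List.pyGetD b 2 0)) r) res
    PySem.List.slice res (some 1) none

-- ===== PORT B =====
def corpFlightBookings_TLE_alt (bookings : List (List Int)) (n : Int) : List Int :=
  if bookings = [] ∨ bookings.headD [] = [] ∨ n = 0 then [0]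
  else
  let diff : List Int := List.replicate (n+2).toNat 0
  let diff := bookings.foldl (fun d b =>
    let d := PySem.List.pySetD d (PySem.List.pyGetD b 0 0)
               (PySem.List.pyGetD d (PySem.List.pyGetD b 0 0) 0 + PySem.List.pyGetD b 2 0)
    PySem.List.pySetD d (PySem.List.pyGetD b 1 0 + 1)
      (PySem.List.pyGetD d (PySem.List.pyGetD b 1 0 + 1) 0 - PySem.List.pyGetD b 2 0)) diff
  let st := (PySem.List.pyRange 1 (n+1) 1).foldl (fun (st : List Int × Int) i =>
      let total := st.2 + PySem.List.pyGetD diff i 0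
      (st.1 ++ [total], total)) (([] : List Int), (0 : Int))
  st.1

-- ===== PRECONDITION & SPEC =====
-- Pre_ admits every input that triggers the shared degenerate-input guard (empty bookings,
-- empty first row, n = 0) plus every well-formed input; it excludes only malformed booking
-- entries past a nonempty first row — rows shorter than 3, endpoints outside 1..n (on which A
-- raises IndexError or silently wraps negative indices), or reversed ranges first > last
-- (degenerate inputs outside the problem's constraints, which A silently ignores).
def Pre_corpFlightBookings_TLE (bookings : List (List Int)) (n : Int) : Prop :=
  bookings.headD [] = [] ∨ n = 0 ∨
  ∀ b ∈ bookings, 3 ≤ b.length ∧ 1 ≤ PySem.List.pyGetD b 0 0 ∧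
    PySem.List.pyGetD b 0 0 ≤ PySem.List.pyGetD b 1 0 ∧ PySem.List.pyGetD b 1 0 ≤ n
instance (bookings : List (List Int)) (n : Int) : Decidable (Pre_corpFlightBookings_TLE bookings n) := by
  unfold Pre_corpFlightBookings_TLE; infer_instance

def pvWitness_corpFlightBookings_TLE : List (List Int) × Int := ([[1, 2, 10], [2, 3, 20]], 3)

def Spec_corpFlightBookings_TLE (bookings : List (List Int)) (n : Int) (out : List Int) : Prop :=
  out = corpFlightBookings_TLE_alt bookings n
instance (bookings : List (List Int)) (n : Int) (out : List Int) : Decidable (Spec_corpFlightBookings_TLE bookings n out) := by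
  unfold Spec_corpFlightBookings_TLE; infer_instance

-- ===== CLAIM (what is proved, stated in full; the proofs are below) =====
def Claim_equal_corpFlightBookings_TLE : Prop := ∀ (bookings : List (List Int)) (n : Int), Dom_corpFlightBookings_TLE bookings n → Pre_corpFlightBookings_TLE bookings n → Spec_corpFlightBookings_TLE bookings n (corpFlightBookings_TLE bookings n)

-- ===== LEMMAS AND PROOFS =====

-- seat count landing on flight k
def pvCnt (L : List (List Int)) (k : Int) : Int :=
  (L.map (fun b => if PySem.List.pyGetD b 0 0 ≤ k ∧ k ≤ PySem.List.pyGetD b 1 0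
                   then PySem.List.pyGetD b 2 0 else 0)).sum

theorem pv_getD_zero (l : List Int) (j : Int) (h : ∀ x ∈ l, x = 0) :
    PySem.List.pyGetD l j 0 = 0 := by
  unfold PySem.List.pyGetD PySem.List.pyGet?
  cases hk : PySem.List.pyIdx? l.length j with
  | none => rfl
  | some k =>
    simp only [Option.bind_some]
    cases hg : l[k]? with
    | none => rfl
    | some a => simpa using h a (List.mem_of_getElem? hg)

-- getD/setD interaction for in-range nonneg Int indices
theorem pv_getD_setD (r : List Int) (i j : Int) (v : Int)
    (hi0 : 0 ≤ i) (hil : i < r.length) (hj0 : 0 ≤ j) :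
    PySem.List.pyGetD (PySem.List.pySetD r i v) j 0 =
      if j = i then v else PySem.List.pyGetD r j 0 := by
  rw [PySem.List.pySetD_of_nonneg r v hi0]
  by_cases hjl : j < (r.length : Int)
  · rw [PySem.List.pyGetD_eq_getElem _ _ hj0 (by simpa using hjl),
        PySem.List.pyGetD_eq_getElem _ _ hj0 hjl, List.getElem_set]
    by_cases h : j = i
    · subst h; simp
    · have : ¬ i.toNat = j.toNat := by omega
      simp [h, this]
  · have h1 : ¬ j = i := by omega
    have hout : ∀ (l : List Int), l.length = r.length → PySem.List.pyGetD l j 0 = 0 := by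
      intro l hl
      unfold PySem.List.pyGetD PySem.List.pyGet? PySem.List.pyIdx?
      rw [hl]
      have : ¬ (j < (r.length : Int)) := hjl
      simp [hj0, this]
    rw [hout _ (by simp), hout r rfl, if_neg h1]

-- A's inner loop
def pvUpd (v lo hi : Int) (r : List Int) : List Int :=
  (PySem.List.pyRange lo (hi+1) 1).foldl
    (fun r k => PySem.List.pySetD r k (PySem.List.pyGetD r k 0 + v)) r

theorem pv_foldl_setD_length (l : List Int) (f : List Int → Int → Int) (r : List Int) :
    (l.foldl (fun r k => PySem.List.pySetD r k (f r k)) r).length = r.length := by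
  induction l generalizing r with
  | nil => rfl
  | cons a t ih => simp [List.foldl_cons, ih, PySem.List.length_pySetD]

theorem pv_length_upd (v lo hi : Int) (r : List Int) : (pvUpd v lo hi r).length = r.length := by
  unfold pvUpd
  exact pv_foldl_setD_length _ (fun r k => PySem.List.pyGetD r k 0 + v) r

theorem pv_getD_upd (v lo hi : Int) (r : List Int) (j : Int)
    (hlo : 0 ≤ lo) (hhi : hi < r.length) (hj : 0 ≤ j) :
    PySem.List.pyGetD (pvUpd v lo hi r) j 0 =
      PySem.List.pyGetD r j 0 + (if lo ≤ j ∧ j ≤ hi then v else 0) := by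
  generalize hm : (hi + 1 - lo).toNat = m
  induction m generalizing lo r with
  | zero =>
    have hnil : hi + 1 ≤ lo := by omega
    unfold pvUpd
    rw [PySem.List.pyRange_one_eq_nil hnil]
    have : ¬ (lo ≤ j ∧ j ≤ hi) := by omega
    simp [this]
  | succ m ih =>
    have hlt : lo < hi + 1 := by omega
    unfold pvUpd
    rw [PySem.List.pyRange_one_cons hlt, List.foldl_cons]
    have hstep : PySem.List.pySetD r lo (PySem.List.pyGetD r lo 0 + v) =
        PySem.List.pySetD r lo (PySem.List.pyGetD r lo 0 + v) := rfl
    set r1 := PySem.List.pySetD r lo (PySem.List.pyGetD r lo 0 + v) with hr1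
    have hlen1 : r1.length = r.length := PySem.List.length_pySetD _ _ _
    have ih' := ih (lo + 1) r1 (by omega) (by rw [hlen1]; exact hhi) (by omega)
    unfold pvUpd at ih'
    rw [ih']
    have hget1 : PySem.List.pyGetD r1 j 0 =
        if j = lo then PySem.List.pyGetD r lo 0 + v else PySem.List.pyGetD r j 0 :=
      pv_getD_setD r lo j _ hlo (by omega) hj
    rw [hget1]
    by_cases hjlo : j = lo
    · subst hjlo
      have h2 : j ≤ j ∧ j ≤ hi := ⟨le_refl _, by omega⟩
      simp [h2]
    · rw [if_neg hjlo]
      have h3 : (lo + 1 ≤ j ∧ j ≤ hi) ↔ (lo ≤ j ∧ j ≤ hi) := by omega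
      rw [if_congr h3 rfl rfl]

-- A's outer loop
theorem pv_A_fold (L : List (List Int)) (r : List Int) (j : Int)
    (hv : ∀ b ∈ L, 0 ≤ PySem.List.pyGetD b 0 0 ∧ PySem.List.pyGetD b 1 0 < r.length)
    (hj : 0 ≤ j) :
    PySem.List.pyGetD
      (L.foldl (fun r b =>
        (PySem.List.pyRange (PySem.List.pyGetD b 0 0) (PySem.List.pyGetD b 1 0 + 1) 1).foldl
          (fun r k => PySem.List.pySetD r k (PySem.List.pyGetD r k 0 + PySem.List.pyGetD b 2 0)) r) r)
      j 0 = PySem.List.pyGetD r j 0 + pvCnt L j := by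
  induction L generalizing r with
  | nil => simp [pvCnt]
  | cons b t ih =>
    rw [List.foldl_cons]
    have hb := hv b (List.mem_cons_self)
    have hupd : (PySem.List.pyRange (PySem.List.pyGetD b 0 0) (PySem.List.pyGetD b 1 0 + 1) 1).foldl
          (fun r k => PySem.List.pySetD r k (PySem.List.pyGetD r k 0 + PySem.List.pyGetD b 2 0)) r
        = pvUpd (PySem.List.pyGetD b 2 0) (PySem.List.pyGetD b 0 0) (PySem.List.pyGetD b 1 0) r := rfl
    rw [hupd]
    have hlen : (pvUpd (PySem.List.pyGetD b 2 0) (PySem.List.pyGetD b 0 0) (PySem.List.pyGetD b 1 0) r).length = r.length :=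
      pv_length_upd _ _ _ _
    rw [ih _ (by intro x hx; rw [hlen]; exact hv x (List.mem_cons_of_mem _ hx)),
        pv_getD_upd _ _ _ _ _ hb.1 hb.2 hj]
    simp only [pvCnt, List.map_cons, List.sum_cons]
    ring

theorem pv_A_fold_length (L : List (List Int)) (r : List Int) :
    (L.foldl (fun r b =>
        (PySem.List.pyRange (PySem.List.pyGetD b 0 0) (PySem.List.pyGetD b 1 0 + 1) 1).foldl
          (fun r k => PySem.List.pySetD r k (PySem.List.pyGetD r k 0 + PySem.List.pyGetD b 2 0)) r) r).length
      = r.length := by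
  induction L generalizing r with
  | nil => rfl
  | cons b t ih =>
    rw [List.foldl_cons, ih]
    exact pv_foldl_setD_length _ _ r

theorem pv_cnt_perm (L L' : List (List Int)) (h : L.Perm L') (k : Int) : pvCnt L k = pvCnt L' k :=
  List.Perm.sum_eq (h.map _)

-- B's diff fold
def pvDsum (L : List (List Int)) (k : Int) : Int :=
  (L.map (fun b =>
    (if k = PySem.List.pyGetD b 0 0 then PySem.List.pyGetD b 2 0 else 0) +
    (if k = PySem.List.pyGetD b 1 0 + 1 then -PySem.List.pyGetD b 2 0 else 0))).sum

theorem pv_B_fold (L : List (List Int)) (d : List Int) (n j : Int)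
    (hv : ∀ b ∈ L, 1 ≤ PySem.List.pyGetD b 0 0 ∧
        PySem.List.pyGetD b 0 0 ≤ PySem.List.pyGetD b 1 0 ∧ PySem.List.pyGetD b 1 0 ≤ n)
    (hd : (d.length : Int) = n + 2) (hj : 0 ≤ j) :
    PySem.List.pyGetD
      (L.foldl (fun d b =>
        let d := PySem.List.pySetD d (PySem.List.pyGetD b 0 0)
                   (PySem.List.pyGetD d (PySem.List.pyGetD b 0 0) 0 + PySem.List.pyGetD b 2 0)
        PySem.List.pySetD d (PySem.List.pyGetD b 1 0 + 1)
          (PySem.List.pyGetD d (PySem.List.pyGetD b 1 0 + 1) 0 - PySem.List.pyGetD b 2 0)) d)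
      j 0 = PySem.List.pyGetD d j 0 + pvDsum L j := by
  induction L generalizing d with
  | nil => simp [pvDsum]
  | cons b t ih =>
    rw [List.foldl_cons]
    have hb := hv b (List.mem_cons_self)
    set b0 := PySem.List.pyGetD b 0 0 with hb0
    set b1 := PySem.List.pyGetD b 1 0 with hb1
    set s := PySem.List.pyGetD b 2 0 with hs
    set d1 := PySem.List.pySetD d b0 (PySem.List.pyGetD d b0 0 + s) with hd1
    have hlen1 : d1.length = d.length := PySem.List.length_pySetD _ _ _
    set d2 := PySem.List.pySetD d1 (b1 + 1) (PySem.List.pyGetD d1 (b1 + 1) 0 - s) with hd2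
    have hlen2 : d2.length = d.length := by rw [hd2, PySem.List.length_pySetD, hlen1]
    have ihd := ih d2 (fun x hx => hv x (List.mem_cons_of_mem _ hx))
      (by rw [hlen2]; exact hd)
    rw [ihd]
    have hb0r : b0 < (d.length : Int) := by omega
    have hb1r : b1 + 1 < (d1.length : Int) := by rw [hlen1]; omega
    have hg1 : PySem.List.pyGetD d1 (b1+1) 0 =
        if (b1+1) = b0 then PySem.List.pyGetD d b0 0 + s else PySem.List.pyGetD d (b1+1) 0 :=
      pv_getD_setD d b0 (b1+1) _ (by omega) hb0r (by omega)
    have hg2 : PySem.List.pyGetD d2 j 0 =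
        if j = b1 + 1 then PySem.List.pyGetD d1 (b1+1) 0 - s else PySem.List.pyGetD d1 j 0 :=
      pv_getD_setD d1 (b1+1) j _ (by omega) hb1r hj
    have hg3 : PySem.List.pyGetD d1 j 0 =
        if j = b0 then PySem.List.pyGetD d b0 0 + s else PySem.List.pyGetD d j 0 :=
      pv_getD_setD d b0 j _ (by omega) hb0r hj
    have hne : ¬ ((b1 : Int) + 1 = b0) := by omega
    rw [hg2, hg1, hg3]
    simp only [pvDsum, List.map_cons, List.sum_cons, ← hb0, ← hb1, ← hs]
    by_cases h1 : j = b1 + 1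
    · subst h1
      have : ¬ (b1 + 1 = b0) := hne
      simp [this]; ring
    · by_cases h2 : j = b0
      · subst h2; simp [h1]; ring
      · simp [h1, h2]

-- sum over 1..i of a point indicator
theorem pv_sum_indicator (p s i : Int) (hp : 1 ≤ p) (hi : 0 ≤ i) :
    ((PySem.List.pyRange 1 (i+1) 1).map (fun k => if k = p then s else 0)).sum =
      if p ≤ i then s else 0 := by
  generalize hm : i.toNat = m
  induction m generalizing i with
  | zero =>
    have h0 : i = 0 := by omega
    subst h0
    rw [PySem.List.pyRange_one_eq_nil (by omega)]
    have : ¬ (p ≤ (0:Int)) := by omega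
    simp [this]
  | succ m ih =>
    have h1 : 1 ≤ i := by omega
    have happ : PySem.List.pyRange 1 (i+1) = PySem.List.pyRange 1 i ++ [i] :=
      PySem.List.pyRange_one_succ_right (by omega)
    rw [happ, List.map_append, List.sum_append]
    have ih' := ih (i-1) (by omega) (by omega)
    rw [(by ring : i - 1 + 1 = i)] at ih'
    rw [ih']
    simp only [List.map_cons, List.map_nil, List.sum_cons, List.sum_nil, add_zero]
    split_ifs <;> omega

-- prefix sums of dsum give cnt
theorem pv_prefix_dsum (L : List (List Int)) (n i : Int)
    (hv : ∀ b ∈ L, 1 ≤ PySem.List.pyGetD b 0 0 ∧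
        PySem.List.pyGetD b 0 0 ≤ PySem.List.pyGetD b 1 0 ∧ PySem.List.pyGetD b 1 0 ≤ n)
    (hi : 0 ≤ i) :
    ((PySem.List.pyRange 1 (i+1) 1).map (fun k => pvDsum L k)).sum = pvCnt L i := by
  induction L with
  | nil => simp [pvDsum, pvCnt]
  | cons b t ih =>
    have hb := hv b (List.mem_cons_self)
    have hsplit : (fun k => pvDsum (b :: t) k) = (fun k =>
        ((if k = PySem.List.pyGetD b 0 0 then PySem.List.pyGetD b 2 0 else 0) +
         (if k = PySem.List.pyGetD b 1 0 + 1 then -PySem.List.pyGetD b 2 0 else 0)) + pvDsum t k) := by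
      funext k; simp [pvDsum]
    rw [hsplit]
    rw [PySem.List.sum_map_add_int]
    rw [PySem.List.sum_map_add_int]
    rw [ih (fun x hx => hv x (List.mem_cons_of_mem _ hx))]
    rw [pv_sum_indicator _ _ _ hb.1 hi]
    have hneg : ((PySem.List.pyRange 1 (i+1) 1).map
        (fun k => if k = PySem.List.pyGetD b 1 0 + 1 then -PySem.List.pyGetD b 2 0 else 0)).sum =
        if PySem.List.pyGetD b 1 0 + 1 ≤ i then -PySem.List.pyGetD b 2 0 else 0 :=
      pv_sum_indicator _ _ _ (by omega) hi
    rw [hneg]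
    simp only [pvCnt, List.map_cons, List.sum_cons]
    rcases hb with ⟨h1, h2, h3⟩
    split_ifs <;> omega

-- B's prefix loop
theorem pv_B_prefix (f : Int → Int) (m : Int) (hm : 0 ≤ m) :
    (PySem.List.pyRange 1 (m+1) 1).foldl (fun (st : List Int × Int) i =>
        (st.1 ++ [st.2 + f i], st.2 + f i)) (([] : List Int), (0 : Int))
      = ((PySem.List.pyRange 1 (m+1) 1).map
           (fun i => ((PySem.List.pyRange 1 (i+1) 1).map f).sum),
         ((PySem.List.pyRange 1 (m+1) 1).map f).sum) := by
  generalize hk : m.toNat = k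
  induction k generalizing m with
  | zero =>
    have h0 : m = 0 := by omega
    subst h0
    rw [PySem.List.pyRange_one_eq_nil (by omega)]
    simp
  | succ k ih =>
    have h1 : 1 ≤ m := by omega
    have happ : PySem.List.pyRange 1 (m+1) = PySem.List.pyRange 1 m ++ [m] :=
      PySem.List.pyRange_one_succ_right (by omega)
    rw [happ, List.foldl_append, List.map_append]
    have ih' := ih (m-1) (by omega) (by omega)
    rw [(by ring : m - 1 + 1 = m)] at ih'
    rw [ih']
    simp [happ, List.sum_append]

theorem pv_alt_eq (bookings : List (List Int)) (n : Int)
    (hg : ¬ (bookings = [] ∨ bookings.headD [] = [] ∨ n = 0))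
    (hv : ∀ b ∈ bookings, 1 ≤ PySem.List.pyGetD b 0 0 ∧
      PySem.List.pyGetD b 0 0 ≤ PySem.List.pyGetD b 1 0 ∧ PySem.List.pyGetD b 1 0 ≤ n)
    (hn : 1 ≤ n) :
    corpFlightBookings_TLE_alt bookings n =
      (PySem.List.pyRange 1 (n+1) 1).map (fun i => pvCnt bookings i) := by
  simp only [corpFlightBookings_TLE_alt, if_neg hg]
  set diff0 : List Int := List.replicate (n+2).toNat 0 with hdiff0
  have hlen0 : ((diff0.length : Int)) = n + 2 := by
    rw [hdiff0, List.length_replicate]; omega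
  have hz : ∀ x ∈ diff0, x = 0 := by
    intro x hx; exact (List.eq_of_mem_replicate hx)
  set diffF := bookings.foldl (fun d b =>
        let d := PySem.List.pySetD d (PySem.List.pyGetD b 0 0)
                   (PySem.List.pyGetD d (PySem.List.pyGetD b 0 0) 0 + PySem.List.pyGetD b 2 0)
        PySem.List.pySetD d (PySem.List.pyGetD b 1 0 + 1)
          (PySem.List.pyGetD d (PySem.List.pyGetD b 1 0 + 1) 0 - PySem.List.pyGetD b 2 0)) diff0
    with hdiffF
  have hget : ∀ j : Int, 0 ≤ j → PySem.List.pyGetD diffF j 0 = pvDsum bookings j := by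
    intro j hj
    rw [hdiffF, pv_B_fold bookings diff0 n j hv hlen0 hj, pv_getD_zero diff0 j hz, zero_add]
  rw [pv_B_prefix (fun i => PySem.List.pyGetD diffF i 0) n (by omega)]
  apply List.map_congr_left
  intro i hi
  have hi1 : 1 ≤ i := ((PySem.List.mem_pyRange_one).1 hi).1
  have hmap : (PySem.List.pyRange 1 (i+1) 1).map (fun k => PySem.List.pyGetD diffF k 0) =
      (PySem.List.pyRange 1 (i+1) 1).map (fun k => pvDsum bookings k) := by
    apply List.map_congr_left
    intro k hk
    exact hget k (by have := ((PySem.List.mem_pyRange_one).1 hk).1; omega)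
  rw [hmap, pv_prefix_dsum bookings n i hv (by omega)]

-- ===== VERDICT (by name: the statement is the Claim_ definition above) =====
theorem corpFlightBookings_TLE_spec : Claim_equal_corpFlightBookings_TLE := by
  intro bookings n hdom hpre
  show corpFlightBookings_TLE bookings n = corpFlightBookings_TLE_alt bookings n
  by_cases hg : (bookings = [] ∨ bookings.headD [] = [] ∨ n = 0)
  · simp only [corpFlightBookings_TLE, corpFlightBookings_TLE_alt, if_pos hg]
  · have hpre' : ∀ b ∈ bookings, 3 ≤ b.length ∧ 1 ≤ PySem.List.pyGetD b 0 0 ∧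
        PySem.List.pyGetD b 0 0 ≤ PySem.List.pyGetD b 1 0 ∧ PySem.List.pyGetD b 1 0 ≤ n := by
      rcases hpre with h | h | h
      · exact absurd (Or.inr (Or.inl h)) hg
      · exact absurd (Or.inr (Or.inr h)) hg
      · exact h
    have hv : ∀ b ∈ bookings, 1 ≤ PySem.List.pyGetD b 0 0 ∧
        PySem.List.pyGetD b 0 0 ≤ PySem.List.pyGetD b 1 0 ∧ PySem.List.pyGetD b 1 0 ≤ n :=
      fun b hb => (hpre' b hb).2
    cases bookings with
    | nil => exact absurd (Or.inl rfl) hg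
    | cons b0 bt =>
      have hb0 := hpre' b0 (List.mem_cons_self)
      have hn : 1 ≤ n := by
        have := hb0.2; omega
      simp only [corpFlightBookings_TLE, if_neg hg]
      set res0 : List Int := (PySem.List.pyRange 0 (n+1) 1).map (fun _ => (0:Int)) with hres0
      have hlen0 : ((res0.length : Int)) = n + 1 := by
        rw [hres0, List.length_map, PySem.List.length_pyRange_one]; omega
      have hz0 : ∀ x ∈ res0, x = 0 := by
        intro x hx
        rw [hres0] at hx
        obtain ⟨y, _, hy⟩ := List.mem_map.1 hx
        exact hy.symm
      set sB := PySem.List.sorted (b0 :: bt) (fun b => PySem.List.pyGetD b 0 0) false with hsB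
      have hperm : sB.Perm (b0 :: bt) := PySem.List.sorted_perm _ _ _
      have hvS : ∀ b ∈ sB, 0 ≤ PySem.List.pyGetD b 0 0 ∧
          ((PySem.List.pyGetD b 1 0 : Int)) < res0.length := by
        intro b hbm
        have h := hv b (hperm.mem_iff.1 hbm)
        exact ⟨by omega, by omega⟩
      set resF := sB.foldl (fun r b =>
        (PySem.List.pyRange (PySem.List.pyGetD b 0 0) (PySem.List.pyGetD b 1 0 + 1) 1).foldl
          (fun r k => PySem.List.pySetD r k (PySem.List.pyGetD r k 0 + PySem.List.pyGetD b 2 0)) r)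
        res0 with hresF
      have hlenF : resF.length = res0.length := pv_A_fold_length sB res0
      have hget : ∀ j : Int, 0 ≤ j → PySem.List.pyGetD resF j 0 = pvCnt (b0 :: bt) j := by
        intro j hj
        rw [hresF, pv_A_fold sB res0 j hvS hj, pv_getD_zero res0 j hz0,
          pv_cnt_perm sB (b0 :: bt) hperm j, zero_add]
      rw [PySem.List.slice_from_one, pv_alt_eq (b0 :: bt) n hg hv hn]
      apply List.ext_getElem
      · simp only [List.length_tail, hlenF, hres0, List.length_map, PySem.List.length_pyRange_one]
        omega
      · intro k h1 h2
        rw [List.getElem_tail]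
        have hk1 : ((k : Int) + 1) < (resF.length : Int) := by
          rw [List.length_tail] at h1; omega
        have e1 : PySem.List.pyGetD resF ((k : Int) + 1) 0 = resF[k + 1] := by
          have e2 : (((k : Int) + 1).toNat) = k + 1 := by omega
          rw [PySem.List.pyGetD_eq_getElem resF 0 (by omega) hk1]
          simp only [e2]
        rw [← e1, hget ((k : Int) + 1) (by omega)]
        rw [List.getElem_map, PySem.List.getElem_pyRange_one]
        congr 1
        ring
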